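-- pv_equiv track=rewrite | github.com/FelipeJesusRemoteSensing/CarbonProgram | base_dados/aplicacao/Scripts/Outros_Scripts/PY - Conferir se há arquivos faltantes nas pastas.py | gerar_sequencia_ano_mes
-- ===== SOURCE A (Python) =====
-- def gerar_sequencia_ano_mes(ano_inicio, mes_inicio, ano_fim, mes_fim):
--     """Gera um conjunto de strings no formato 'ANO_MES'."""
--     sequencia = set()
--     for ano in range(ano_inicio, ano_fim + 1):
--         start_month = mes_inicio if ano == ano_inicio else 1
--         end_month = mes_fim if ano == ano_fim else 12
--         for mes in range(start_month, end_month + 1):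
--             sequencia.add(f"{ano}_{mes:02d}")
--     return sequencia
-- ===== SOURCE B (Python) =====
-- def gerar_sequencia_ano_mes(ano_inicio, mes_inicio, ano_fim, mes_fim):
--     """Gera um conjunto de strings no formato 'ANO_MES'."""
--     sequencia = set()
--     inicio = ano_inicio * 12 + (mes_inicio - 1)
--     fim = ano_fim * 12 + (mes_fim - 1)
--     for idx in range(inicio, fim + 1):
--         sequencia.add(f"{idx // 12}_{idx % 12 + 1:02d}")
--     return sequencia
-- ===== Notes on version B (the rewrite author's own statement) =====
-- stated objective: simpler
-- what changed: Replaces the nested year/month loops with per-year start/end-month branches by one flat loop over an absolute-month index (ano*12+mes-1), recovering year and month by floor division and modulo.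
-- outside the precondition, e.g. on gerar_sequencia_ano_mes(2020, 0, 2020, 1): A returns {'2020_00', '2020_01'}, B returns {'2019_12', '2020_01'}; on gerar_sequencia_ano_mes(2020, 12, 2020, 13): A returns {'2020_13', '2020_12'}, B returns {'2021_01', '2020_12'}
import Mathlib
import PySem

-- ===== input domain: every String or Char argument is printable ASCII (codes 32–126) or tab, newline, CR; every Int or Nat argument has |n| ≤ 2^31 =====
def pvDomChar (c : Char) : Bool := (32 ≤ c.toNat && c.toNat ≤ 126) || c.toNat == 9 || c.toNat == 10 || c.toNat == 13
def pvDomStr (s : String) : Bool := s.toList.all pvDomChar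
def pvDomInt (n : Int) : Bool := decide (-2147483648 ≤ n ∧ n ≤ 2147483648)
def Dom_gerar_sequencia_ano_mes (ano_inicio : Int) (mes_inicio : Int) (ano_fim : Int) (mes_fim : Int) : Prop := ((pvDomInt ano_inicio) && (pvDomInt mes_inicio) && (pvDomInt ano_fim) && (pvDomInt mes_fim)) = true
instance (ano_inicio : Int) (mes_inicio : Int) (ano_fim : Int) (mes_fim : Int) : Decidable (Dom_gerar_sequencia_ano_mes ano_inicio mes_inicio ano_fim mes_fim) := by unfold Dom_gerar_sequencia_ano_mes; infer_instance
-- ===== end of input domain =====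

-- B replaces A's nested year/month loops with one flat loop over an absolute-month
-- index, recovering year and month arithmetically (objective: simpler).

-- f"{m:02d}": zero-pad to width 2 (exact: only single digits 0..9 are shorter than 2)
def pvPad2 (m : Int) : String :=
  if 0 ≤ m ∧ m < 10 then "0" ++ PySem.Int.toStr m else PySem.Int.toStr m

-- f"{ano}_{mes:02d}"
def pvFmt (ano mes : Int) : String := PySem.Int.toStr ano ++ "_" ++ pvPad2 mes

-- ===== PORT A =====
def gerar_sequencia_ano_mes (ano_inicio : Int) (mes_inicio : Int) (ano_fim : Int) (mes_fim : Int) : List String :=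
  (PySem.List.pyRange ano_inicio (ano_fim + 1) 1).foldl (fun sequencia ano =>
    let start_month := if ano = ano_inicio then mes_inicio else 1
    let end_month := if ano = ano_fim then mes_fim else 12
    (PySem.List.pyRange start_month (end_month + 1) 1).foldl (fun sequencia mes =>
      PySem.Set.add sequencia (pvFmt ano mes)) sequencia) []

-- ===== PORT B =====
def gerar_sequencia_ano_mes_alt (ano_inicio : Int) (mes_inicio : Int) (ano_fim : Int) (mes_fim : Int) : List String :=
  let inicio := ano_inicio * 12 + (mes_inicio - 1)
  let fim := ano_fim * 12 + (mes_fim - 1)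
  (PySem.List.pyRange inicio (fim + 1) 1).foldl (fun sequencia idx =>
    PySem.Set.add sequencia (pvFmt (PySem.Int.floordiv idx 12) (PySem.Int.mod idx 12 + 1))) []

-- ===== PRECONDITION & SPEC =====
-- Pre_ admits calendar months 1..12 (the function's natural domain) and, in addition,
-- any input whose span is empty so that both programs return the empty set; what it
-- excludes are out-of-range month arguments on a nonempty span, where A returns
-- strings with a literal out-of-range month field (e.g. '2020_00' or '2020_13')
-- while B's absolute-month arithmetic yields real calendar months, so both
-- behaviours are defensible readings of an unspecified corner.
def Pre_gerar_sequencia_ano_mes (ano_inicio : Int) (mes_inicio : Int) (ano_fim : Int) (mes_fim : Int) : Prop :=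
  (1 ≤ mes_inicio ∧ mes_inicio ≤ 12 ∧ 1 ≤ mes_fim ∧ mes_fim ≤ 12)
  ∨ (ano_fim < ano_inicio ∧ mes_fim - mes_inicio < 12 * (ano_inicio - ano_fim))
  ∨ (ano_inicio = ano_fim ∧ mes_fim < mes_inicio)
instance (ano_inicio : Int) (mes_inicio : Int) (ano_fim : Int) (mes_fim : Int) : Decidable (Pre_gerar_sequencia_ano_mes ano_inicio mes_inicio ano_fim mes_fim) := by unfold Pre_gerar_sequencia_ano_mes; infer_instance

def pvWitness_gerar_sequencia_ano_mes : Int × Int × Int × Int := (2019, 11, 2020, 2)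

def Spec_gerar_sequencia_ano_mes (ano_inicio : Int) (mes_inicio : Int) (ano_fim : Int) (mes_fim : Int) (out : List String) : Prop := out = gerar_sequencia_ano_mes_alt ano_inicio mes_inicio ano_fim mes_fim
instance (ano_inicio : Int) (mes_inicio : Int) (ano_fim : Int) (mes_fim : Int) (out : List String) : Decidable (Spec_gerar_sequencia_ano_mes ano_inicio mes_inicio ano_fim mes_fim out) := by unfold Spec_gerar_sequencia_ano_mes; infer_instance

-- ===== CLAIM (what is proved, stated in full; the proofs are below) =====
def Claim_equal_gerar_sequencia_ano_mes : Prop := ∀ (ano_inicio : Int) (mes_inicio : Int) (ano_fim : Int) (mes_fim : Int), Dom_gerar_sequencia_ano_mes ano_inicio mes_inicio ano_fim mes_fim → Pre_gerar_sequencia_ano_mes ano_inicio mes_inicio ano_fim mes_fim → Spec_gerar_sequencia_ano_mes ano_inicio mes_inicio ano_fim mes_fim (gerar_sequencia_ano_mes ano_inicio mes_inicio ano_fim mes_fim)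

-- ===== LEMMAS AND PROOFS =====

-- one year's month span m0..m1, folded the A way, equals B's fold over the
-- matching absolute-index span [ano*12+m0-1, ano*12+m1)
theorem pv_month_span (ano : Int) (m1 : Int) (h1 : m1 ≤ 12) :
    ∀ (n : Nat) (s : Int) (seq : List String), 1 ≤ s → (m1 + 1 - s).toNat = n →
    (PySem.List.pyRange s (m1 + 1) 1).foldl (fun sequencia mes =>
        PySem.Set.add sequencia (pvFmt ano mes)) seq
    = (PySem.List.pyRange (ano * 12 + (s - 1)) (ano * 12 + m1) 1).foldl (fun sequencia idx =>
        PySem.Set.add sequencia (pvFmt (PySem.Int.floordiv idx 12) (PySem.Int.mod idx 12 + 1))) seq := by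
  intro n
  induction n with
  | zero =>
    intro s seq hs hn
    rw [PySem.List.pyRange_one_eq_nil (by omega), PySem.List.pyRange_one_eq_nil (by omega)]
    rfl
  | succ k ih =>
    intro s seq hs hn
    have hsm : s ≤ m1 := by omega
    rw [PySem.List.pyRange_one_cons (a := s) (b := m1 + 1) (by omega),
        PySem.List.pyRange_one_cons (a := ano * 12 + (s - 1)) (b := ano * 12 + m1) (by omega)]
    simp only [List.foldl_cons]
    have hdiv : PySem.Int.floordiv (ano * 12 + (s - 1)) 12 = ano := by
      rw [PySem.Int.floordiv_eq_iff_of_pos (by omega)]; constructor <;> nlinarith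
    have hmod : PySem.Int.mod (ano * 12 + (s - 1)) 12 = s - 1 := by
      have := PySem.Int.floordiv_mul_add_mod (ano * 12 + (s - 1)) 12
      rw [hdiv] at this; omega
    rw [hdiv, hmod, show s - 1 + 1 = s by omega,
        show ano * 12 + (s - 1) + 1 = ano * 12 + (s + 1 - 1) by ring]
    exact ih (s + 1) _ (by omega) (by omega)

-- A's year loop from a0 (with start-month m0) equals B's flat fold over the rest
-- of the index range; induction on the number of remaining years
theorem pv_years (a1 m1 : Int) (hm1 : 1 ≤ m1 ∧ m1 ≤ 12) :
    ∀ (n : Nat) (a0 m0 : Int) (seq : List String),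
    1 ≤ m0 → m0 ≤ 12 → (a1 - a0).toNat = n → a0 ≤ a1 →
    (PySem.List.pyRange a0 (a1 + 1) 1).foldl (fun sequencia ano =>
      let start_month := if ano = a0 then m0 else 1
      let end_month := if ano = a1 then m1 else 12
      (PySem.List.pyRange start_month (end_month + 1) 1).foldl (fun sequencia mes =>
        PySem.Set.add sequencia (pvFmt ano mes)) sequencia) seq
    = (PySem.List.pyRange (a0 * 12 + (m0 - 1)) (a1 * 12 + (m1 - 1) + 1) 1).foldl (fun sequencia idx =>
        PySem.Set.add sequencia (pvFmt (PySem.Int.floordiv idx 12) (PySem.Int.mod idx 12 + 1))) seq := by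
  intro n
  induction n with
  | zero =>
    intro a0 m0 seq hm0 hm0' hn hle
    have ha : a0 = a1 := by omega
    subst ha
    rw [PySem.List.pyRange_one_cons (a := a0) (b := a0 + 1) (by omega),
        PySem.List.pyRange_one_eq_nil (by omega)]
    simp only [List.foldl_cons, List.foldl_nil]
    rw [show a0 * 12 + (m1 - 1) + 1 = a0 * 12 + m1 by ring]
    exact pv_month_span a0 m1 hm1.2 (m1 + 1 - m0).toNat m0 seq hm0 rfl
  | succ k ih =>
    intro a0 m0 seq hm0 hm0' hn hle
    have hlt : a0 < a1 := by omega
    rw [PySem.List.pyRange_one_cons (a := a0) (b := a1 + 1) (by omega)]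
    simp only [List.foldl_cons, if_neg (show ¬ (a0 = a1) from by omega), if_true]
    -- first year contributes months m0..12
    rw [pv_month_span a0 12 le_rfl (12 + 1 - m0).toNat m0 seq hm0 rfl]
    -- remaining years: the loop body no longer sees ano = a0; re-key it to a0+1 with m0' = 1
    have hbody :
        ∀ acc : List String,
        (PySem.List.pyRange (a0 + 1) (a1 + 1) 1).foldl (fun sequencia ano =>
          let start_month := if ano = a0 then m0 else 1
          let end_month := if ano = a1 then m1 else 12
          (PySem.List.pyRange start_month (end_month + 1) 1).foldl (fun sequencia mes =>
            PySem.Set.add sequencia (pvFmt ano mes)) sequencia) acc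
        = (PySem.List.pyRange (a0 + 1) (a1 + 1) 1).foldl (fun sequencia ano =>
          let start_month := if ano = a0 + 1 then (1 : Int) else 1
          let end_month := if ano = a1 then m1 else 12
          (PySem.List.pyRange start_month (end_month + 1) 1).foldl (fun sequencia mes =>
            PySem.Set.add sequencia (pvFmt ano mes)) sequencia) acc := by
      intro acc
      apply PySem.List.foldl_congr_mem
      intro acc' x hx
      have hx' := (PySem.List.mem_pyRange_one).1 hx
      simp only [if_neg (show ¬ (x = a0) from by omega), ite_self]
    rw [hbody, ih (a0 + 1) 1 _ (by omega) (by omega) (by omega) (by omega)]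
    -- glue the two index spans
    rw [show (a0 + 1) * 12 + (1 - 1 : Int) = a0 * 12 + 12 by ring,
        ← List.foldl_append,
        ← PySem.List.pyRange_one_append (a0 * 12 + (m0 - 1)) (a0 * 12 + 12) (a1 * 12 + (m1 - 1) + 1)
          (by omega) (by nlinarith [hlt])]

-- ===== VERDICT (by name: the statement is the Claim_ definition above) =====
theorem gerar_sequencia_ano_mes_spec : Claim_equal_gerar_sequencia_ano_mes := by
  intro a0 m0 a1 m1 _hdom hpre
  unfold Spec_gerar_sequencia_ano_mes
  simp only [gerar_sequencia_ano_mes, gerar_sequencia_ano_mes_alt]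
  rcases hpre with ⟨h1, h2, h3, h4⟩ | ⟨hlt, hm⟩ | ⟨he, hm⟩
  · -- calendar months
    by_cases hle : a0 ≤ a1
    · exact pv_years a1 m1 ⟨h3, h4⟩ (a1 - a0).toNat a0 m0 [] h1 h2 rfl hle
    · rw [PySem.List.pyRange_one_eq_nil (by omega),
          PySem.List.pyRange_one_eq_nil (by omega)]
      rfl
  · -- end year before start year, both spans empty
    rw [PySem.List.pyRange_one_eq_nil (by omega),
        PySem.List.pyRange_one_eq_nil (by omega)]
    rfl
  · -- same year, end month before start month, both spans empty
    subst he
    rw [PySem.List.pyRange_one_cons (a := a0) (b := a0 + 1) (by omega),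
        PySem.List.pyRange_one_eq_nil (a := a0 + 1) (b := a0 + 1) (by omega)]
    simp only [List.foldl_cons, List.foldl_nil, if_true]
    rw [PySem.List.pyRange_one_eq_nil (by omega),
        PySem.List.pyRange_one_eq_nil (by omega)]
    rfl
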